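-- pv_equiv track=rewrite | github.com/perfumemakes/Algorithm-with-python | 프로그래머스/lv0/120863. 다항식 더하기/다항식 더하기.py | solution
-- ===== SOURCE A (Python) =====
-- def solution(polynomial):
--     polynomial = polynomial.replace("+", "")
--     polynomial = polynomial.split()
--     n1 = 0
--     n2 = 0
--     for i in polynomial:
--         if 'x' in i:
--             if len(i) == 1:
--                 n1 += 1
--             else:
--                 n1 += int(i[:-1])
--         else:
--             n2+=int(i)
--
--     if n2 == 0:
--         if n1 == 0:
--             answer = "0"
--         elif n1 == 1:
--             answer = "x"
--         else:
--             answer = f"{n1}x"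
--     else:
--         if n1 == 0:
--             answer = f"{n2}"
--         elif n1 == 1:
--             answer = f"x + {n2}"
--         else:
--             answer = f"{n1}x + {n2}"
--     return answer
-- ===== SOURCE B (Python) =====
-- def solution(polynomial):
--     def add(buf, n1, n2):
--         if buf[-1] == "x":
--             return (n1 + (1 if buf == "x" else int(buf[:-1])), n2)
--         return (n1, n2 + int(buf))
--
--     n1 = 0
--     n2 = 0
--     buf = ""
--     for ch in polynomial:
--         if ch == "+":
--             continue
--         if ch.isspace():
--             if buf:
--                 n1, n2 = add(buf, n1, n2)
--                 buf = ""
--         else: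
--             buf += ch
--     if buf:
--         n1, n2 = add(buf, n1, n2)
--
--     terms = []
--     if n1 != 0:
--         terms.append("x" if n1 == 1 else f"{n1}x")
--     if n2 != 0:
--         terms.append(str(n2))
--     return " + ".join(terms) if terms else "0"
-- ===== Notes on version B (the rewrite author's own statement) =====
-- stated objective: alternative
-- what changed: Replaces A's preprocessing (deleting every plus sign with str.replace, then str.split and a fold over the resulting word list) with a single character-level scan that maintains an explicit token buffer, skips plus characters inline and flushes the buffer at each whitespace boundary and once at the end, and replaces A's six-way nested if/elif formatting tree with joining a built list of term strings; same linear cost, a genuinely different traversal.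
import Mathlib
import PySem

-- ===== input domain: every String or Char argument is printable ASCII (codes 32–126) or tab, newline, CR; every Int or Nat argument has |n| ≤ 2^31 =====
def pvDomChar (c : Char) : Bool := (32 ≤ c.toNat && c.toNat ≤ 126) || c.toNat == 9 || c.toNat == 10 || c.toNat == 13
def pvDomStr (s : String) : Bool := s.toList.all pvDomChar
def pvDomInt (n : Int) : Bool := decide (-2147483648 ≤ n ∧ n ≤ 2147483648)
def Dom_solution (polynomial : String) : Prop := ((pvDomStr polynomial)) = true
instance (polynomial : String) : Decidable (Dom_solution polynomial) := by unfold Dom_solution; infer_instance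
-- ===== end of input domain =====

-- B replaces A's replace+split preprocessing with a single character-level scan (explicit
-- token buffer, one flush per word boundary) and A's nested if/elif formatting tree with a
-- joined list of term strings; same O(n) cost, a different decomposition of the task.

-- ===== PORT A =====
-- loop body of A's for-loop; none = a ValueError from int() (excluded by Pre_solution)
def solFoldA (acc : Option (Int × Int)) (i : List Char) : Option (Int × Int) :=
  match acc with
  | none => none
  | some (n1, n2) =>
    if PySem.Chars.isIn ['x'] i then
      if i.length = 1 then some (n1 + 1, n2)
      else
        match PySem.Int.ofChars? (PySem.List.slice i none (some (-1))) with
        | some v => some (n1 + v, n2)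
        | none => none
    else
      match PySem.Int.ofChars? i with
      | some v => some (n1, n2 + v)
      | none => none

-- A's final if/elif formatting tree
def solAnswer (n1 n2 : Int) : String :=
  if n2 = 0 then
    if n1 = 0 then "0"
    else if n1 = 1 then "x"
    else String.ofList (PySem.Int.toChars n1 ++ ['x'])
  else
    if n1 = 0 then String.ofList (PySem.Int.toChars n2)
    else if n1 = 1 then String.ofList (['x', ' ', '+', ' '] ++ PySem.Int.toChars n2)
    else String.ofList (PySem.Int.toChars n1 ++ ['x', ' ', '+', ' '] ++ PySem.Int.toChars n2)

def solution (polynomial : String) : String :=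
  match (PySem.Chars.split₀ (PySem.Chars.replace polynomial.toList ['+'] [])).foldl
      solFoldA (some (0, 0)) with
  | none => ""   -- Python raises ValueError here; excluded by Pre_solution
  | some (n1, n2) => solAnswer n1 n2

-- ===== PORT B =====
-- B's helper 'add(buf, n1, n2)'; none = a ValueError from int() (excluded by Pre_solution)
def addTok (buf : List Char) (n1 n2 : Int) : Option (Int × Int) :=
  if buf.getLast? = some 'x' then
    (if buf = ['x'] then some 1
     else PySem.Int.ofChars? (PySem.List.slice buf none (some (-1)))).map (fun v => (n1 + v, n2))
  else (PySem.Int.ofChars? buf).map (fun v => (n1, n2 + v))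

-- B's character-level scan: skip '+', flush the buffer at whitespace, final flush at the end
def scanB : List Char → List Char → Int → Int → Option (Int × Int)
  | [], buf, n1, n2 => if buf.isEmpty then some (n1, n2) else addTok buf n1 n2
  | c :: rest, buf, n1, n2 =>
    if c = '+' then scanB rest buf n1 n2
    else if PySem.Chars.isspace c then
      if buf.isEmpty then scanB rest buf n1 n2
      else
        match addTok buf n1 n2 with
        | some (a, b) => scanB rest [] a b
        | none => none
    else scanB rest (buf ++ [c]) n1 n2

-- B's list-of-terms formatting joined with " + "
def altAnswer (n1 n2 : Int) : String :=
  let terms : List (List Char) :=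
    (if n1 ≠ 0 then [if n1 = 1 then ['x'] else PySem.Int.toChars n1 ++ ['x']] else []) ++
    (if n2 ≠ 0 then [PySem.Int.toChars n2] else [])
  if terms.isEmpty then "0" else String.ofList (PySem.Chars.join [' ', '+', ' '] terms)

def solution_alt (polynomial : String) : String :=
  match scanB polynomial.toList [] 0 0 with
  | some (n1, n2) => altAnswer n1 n2
  | none => ""   -- a ValueError from int(); excluded by Pre_solution

-- ===== PRECONDITION & SPEC =====
-- a token A's loop finishes on without raising: "x", or <int>"x", or a plain int literal
def goodTok (t : List Char) : Bool :=
  (t == ['x']) ||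
  (PySem.Chars.endswith t ['x'] && !(t == ['x']) &&
    (PySem.Int.ofChars? (PySem.List.slice t none (some (-1)))).isSome) ||
  (!(PySem.Chars.isIn ['x'] t) && (PySem.Int.ofChars? t).isSome)

-- Pre_ excludes exactly the inputs where Python's int() raises ValueError in A's loop
def Pre_solution (polynomial : String) : Prop :=
  ∀ t ∈ PySem.Chars.split₀ (PySem.Chars.replace polynomial.toList ['+'] []), goodTok t = true
instance (polynomial : String) : Decidable (Pre_solution polynomial) := by
  unfold Pre_solution; infer_instance

def pvWitness_solution : String := "3x + -2x + 7 + x"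

def Spec_solution (polynomial : String) (out : String) : Prop := out = solution_alt polynomial
instance (polynomial : String) (out : String) : Decidable (Spec_solution polynomial out) := by
  unfold Spec_solution; infer_instance

-- ===== CLAIM (what is proved, stated in full; the proofs are below) =====
def Claim_equal_solution : Prop := ∀ (polynomial : String), Dom_solution polynomial → Pre_solution polynomial → Spec_solution polynomial (solution polynomial)

-- ===== LEMMAS AND PROOFS =====

-- replacing "+" by "" is filtering the '+' characters out
lemma replace_go_plus (l : List Char) : ∀ acc : List Char,
    PySem.Chars.replace.go ['+'] [] l.length l acc
      = acc.reverse ++ l.filter (fun c => !(c == '+')) := by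
  induction l with
  | nil => intro acc; simp [PySem.Chars.replace.go]
  | cons c t ih =>
    intro acc
    by_cases hc : c = '+'
    · subst hc
      simp only [List.length_cons, PySem.Chars.replace.go,
        List.isPrefixOf, List.drop]
      simp [ih]
    · have hb : (c == '+') = false := beq_eq_false_iff_ne.mpr hc
      have hpre : (['+'].isPrefixOf (c :: t)) = false := by
        simp [List.isPrefixOf, Ne.symm hc]
      simp only [List.length_cons, PySem.Chars.replace.go, hpre]
      simp [ih, hb]

lemma replace_plus (s : List Char) :
    PySem.Chars.replace s ['+'] [] = s.filter (fun c => !(c == '+')) := by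
  simpa [PySem.Chars.replace] using replace_go_plus s []

-- split₀.go's accumulator pulls out in front
lemma splitgo_acc (cs : List Char) : ∀ (cur : List Char) (acc : List (List Char)),
    PySem.Chars.split₀.go cs cur acc = acc.reverse ++ PySem.Chars.split₀.go cs cur [] := by
  induction cs with
  | nil =>
    intro cur acc
    by_cases h : cur.isEmpty <;> simp [PySem.Chars.split₀.go, h]
  | cons c rest ih =>
    intro cur acc
    by_cases hs : PySem.Chars.isspace c
    · by_cases h : cur.isEmpty
      · simp only [PySem.Chars.split₀.go, hs, h, if_true]
        exact ih [] acc
      · simp only [PySem.Chars.split₀.go, hs, h, if_true, if_false, Bool.false_eq_true]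
        rw [ih [] (cur.reverse :: acc), ih [] [cur.reverse]]
        simp
    · simp only [PySem.Chars.split₀.go, hs, Bool.false_eq_true, if_false]
      exact ih _ _
  
-- on a good token B's add computes exactly A's loop step, and neither raises
lemma flush_eq (t : List Char) (h : goodTok t = true) (n1 n2 : Int) :
    ∃ p : Int × Int, addTok t n1 n2 = some p ∧ solFoldA (some (n1, n2)) t = some p := by
  by_cases heq : t = ['x']
  · subst heq
    refine ⟨(n1 + 1, n2), by simp [addTok], ?_⟩
    have hin : PySem.Chars.isIn ['x'] ['x'] = true := by decide
    simp only [solFoldA, hin, if_true, List.length_singleton]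
  · have hb : (t == ['x']) = false := beq_eq_false_iff_ne.mpr heq
    cases hend : PySem.Chars.endswith t ['x'] with
    | true =>
      have hsuf : ['x'] <:+ t := (PySem.Chars.endswith_iff t ['x']).mp hend
      have hin : PySem.Chars.isIn ['x'] t = true :=
        (PySem.Chars.isIn_iff_infix ['x'] t).mpr hsuf.isInfix
      simp only [goodTok, hb, hend, hin, Bool.not_false, Bool.true_and, Bool.and_true,
        Bool.false_or, Bool.not_true, Bool.false_and, Bool.or_false] at h
      obtain ⟨v, hv⟩ := Option.isSome_iff_exists.mp h
      have hlen : t.length ≠ 1 := by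
        intro hl; exact heq (hsuf.eq_of_length (by simp [hl])).symm
      have hlast : t.getLast? = some 'x' := by
        obtain ⟨u, rfl⟩ := hsuf
        simp
      exact ⟨(n1 + v, n2), by simp [addTok, hlast, heq, hv],
        by simp [solFoldA, hin, hlen, hv]⟩
    | false =>
      simp only [goodTok, hb, hend, Bool.false_and, Bool.false_or,
        Bool.and_eq_true, Bool.not_eq_true', Option.isSome_iff_exists] at h
      obtain ⟨hnin, v, hv⟩ := h
      have hmem : 'x' ∉ t := by
        intro hx
        have : PySem.Chars.isIn ['x'] t = true :=
          (PySem.Chars.isIn_iff_infix ['x'] t).mpr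
            (by obtain ⟨s1, s2, rfl⟩ := List.append_of_mem hx
                exact ⟨s1, s2, by simp⟩)
        simp [hnin] at this
      have hlast : t.getLast? ≠ some 'x' := by
        intro hl
        exact hmem (List.mem_of_getLast? hl)
      exact ⟨(n1, n2 + v), by simp [addTok, hlast, hv], by simp [solFoldA, hnin, hv]⟩

-- the scan over the raw characters computes A's fold over the split-up words
lemma scan_eq_fold (cs : List Char) : ∀ (buf : List Char) (n1 n2 : Int),
    (∀ t ∈ PySem.Chars.split₀.go (cs.filter (fun c => !(c == '+'))) buf.reverse [],
        goodTok t = true) →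
    scanB cs buf n1 n2
      = (PySem.Chars.split₀.go (cs.filter (fun c => !(c == '+'))) buf.reverse []).foldl
          solFoldA (some (n1, n2)) := by
  induction cs with
  | nil =>
    intro buf n1 n2 hg
    by_cases h : buf.isEmpty
    · simp [scanB, h, PySem.Chars.split₀.go, List.isEmpty_reverse, List.filter]
    · have hg' : goodTok buf = true := by
        apply hg
        simp [PySem.Chars.split₀.go, List.filter, List.isEmpty_reverse, h]
      obtain ⟨p, hp1, hp2⟩ := flush_eq buf hg' n1 n2
      simp [scanB, h, PySem.Chars.split₀.go, List.isEmpty_reverse, List.filter, hp1, hp2]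
  | cons c rest ih =>
    intro buf n1 n2 hg
    by_cases hc : c = '+'
    · subst hc
      simp only [scanB]
      have hfil : (('+' :: rest).filter (fun c => !(c == '+'))) = rest.filter (fun c => !(c == '+')) := by
        simp
      rw [hfil] at hg ⊢
      exact ih buf n1 n2 hg
    · have hb : (c == '+') = false := beq_eq_false_iff_ne.mpr hc
      have hfil : ((c :: rest).filter (fun c => !(c == '+'))) = c :: rest.filter (fun c => !(c == '+')) := by
        simp [hb]
      rw [hfil] at hg ⊢
      by_cases hs : PySem.Chars.isspace c
      · by_cases h : buf.isEmpty
        · have hbuf : buf = [] := by simpa [List.isEmpty_iff] using h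
          subst hbuf
          simp only [scanB, hc, if_false, hs, if_true, List.isEmpty_nil]
          simp only [PySem.Chars.split₀.go, hs, if_true, List.reverse_nil,
            List.isEmpty_nil] at hg ⊢
          exact ih [] n1 n2 hg
        · simp only [PySem.Chars.split₀.go, hs, if_true, List.isEmpty_reverse, h,
            if_false, Bool.false_eq_true, List.reverse_reverse] at hg ⊢
          rw [splitgo_acc] at hg ⊢
          have hg' : goodTok buf = true := hg buf (by simp)
          obtain ⟨p, hp1, hp2⟩ := flush_eq buf hg' n1 n2
          simp only [scanB, hc, if_false, hs, if_true, h, Bool.false_eq_true, hp1]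
          obtain ⟨a, b⟩ := p
          rw [List.foldl_append]
          simp only [List.reverse_singleton, List.foldl_cons, List.foldl_nil, hp2]
          refine ih [] a b (fun t ht => hg t ?_)
          simp only [List.reverse_nil] at ht
          simp [ht]
      · simp only [PySem.Chars.split₀.go, hs, Bool.false_eq_true, if_false] at hg ⊢
        have hrev : c :: buf.reverse = (buf ++ [c]).reverse := by simp
        rw [hrev] at hg ⊢
        simp only [scanB, hc, if_false, hs, Bool.false_eq_true]
        exact ih (buf ++ [c]) n1 n2 hg

-- the two formatters agree
lemma format_eq (n1 n2 : Int) : solAnswer n1 n2 = altAnswer n1 n2 := by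
  unfold solAnswer altAnswer
  by_cases h2 : n2 = 0 <;> by_cases h1 : n1 = 0 <;> by_cases h1' : n1 = 1 <;>
    simp [h1, h2, h1', PySem.Chars.join_singleton, PySem.Chars.join_cons_cons,
      List.append_assoc]

-- ===== VERDICT (by name: the statement is the Claim_ definition above) =====
theorem solution_spec : Claim_equal_solution := by
  intro polynomial _hdom hpre
  unfold Spec_solution solution solution_alt
  unfold Pre_solution at hpre
  rw [replace_plus, PySem.Chars.split₀] at hpre
  rw [replace_plus, PySem.Chars.split₀]
  rw [scan_eq_fold polynomial.toList [] 0 0 (by simpa using hpre)]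
  simp only [List.reverse_nil]
  cases hres : (PySem.Chars.split₀.go (polynomial.toList.filter fun c => !(c == '+')) [] []).foldl solFoldA (some (0, 0)) with
  | none => rfl
  | some p => obtain ⟨a, b⟩ := p; exact format_eq a b
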